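-- pv_equiv track=rewrite | github.com/aitorperezz/steganography-lab | lab.py | encodeMessageInPixels
-- ===== SOURCE A (Python) =====
-- import math
--
-- def encodeMessageInPixels(pixels, binaryMessage):
--
-- 	# Variable to store the new pixel values.
-- 	newPixels = []
--
-- 	# Index for the current 0 or 1 in the binary message and length of the message.
-- 	currentIndex = 0
-- 	messageLen = len(binaryMessage)
--
-- 	# Iterate over all the pixels in the original image (flattened).
-- 	for pixel in pixels:
--
-- 		# Declare a new pixel.
-- 		newPixel = ()
--
-- 		# A pixel can have several values, 1 value in Black and White format,
-- 		# three values in RGB format. For us, this is not important, we iterate over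
-- 		# all possible values inside the pixel.
-- 		for value in pixel:
--
-- 			if currentIndex < messageLen:
-- 				newPixel += (math.floor(value / 2) * 2 + int(binaryMessage[currentIndex], 2), )
-- 				currentIndex += 1
-- 			else:
-- 				newPixel += (value, )
--
-- 		newPixels.append(newPixel)
--
-- 	return newPixels
-- ===== SOURCE B (Python) =====
-- def encodeMessageInPixels(pixels, binaryMessage):
--     # Flatten all pixel values, encode them in one flat pass against the
--     # message prefix, then regroup by slicing consecutive chunks back out.
--     flat = [v for pixel in pixels for v in pixel]
--     n = min(len(binaryMessage), len(flat))
--     res = [v // 2 * 2 + int(binaryMessage[j], 2) if j < n else v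
--            for j, v in enumerate(flat)]
--     newPixels = []
--     offset = 0
--     for pixel in pixels:
--         newPixels.append(tuple(res[offset:offset + len(pixel)]))
--         offset += len(pixel)
--     return newPixels
-- ===== Notes on version B (the rewrite author's own statement) =====
-- stated objective: alternative
-- what changed: Replaced the nested pixel/value loops threading a running message index with a flatten -> one flat encoding pass over enumerated values -> regroup-by-slicing decomposition.
import Mathlib
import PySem

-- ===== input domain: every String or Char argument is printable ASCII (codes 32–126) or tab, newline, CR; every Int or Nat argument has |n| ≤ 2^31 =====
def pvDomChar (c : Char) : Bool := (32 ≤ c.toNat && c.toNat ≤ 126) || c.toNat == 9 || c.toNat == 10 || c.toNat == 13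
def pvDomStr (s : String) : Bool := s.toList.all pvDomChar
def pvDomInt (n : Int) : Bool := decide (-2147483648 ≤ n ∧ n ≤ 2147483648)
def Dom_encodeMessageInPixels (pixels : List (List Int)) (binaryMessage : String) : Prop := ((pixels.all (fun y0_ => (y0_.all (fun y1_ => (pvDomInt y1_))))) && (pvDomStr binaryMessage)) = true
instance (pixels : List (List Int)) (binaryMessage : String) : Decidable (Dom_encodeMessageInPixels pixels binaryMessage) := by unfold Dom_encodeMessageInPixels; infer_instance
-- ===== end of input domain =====

-- B replaces the index-threading nested loops by flatten / one flat encoding pass / regroup-by-slicing (alternative decomposition, same cost).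
-- Python A returns list of TUPLES; under the type convention both ports return List (List Int).

-- int(c, 2) for a single char: exact for c ∈ {'0','1'} (Pre_ restricts to these);
-- Python raises ValueError on any other single char.
def pyInt2 (c : Char) : Int := if c = '1' then 1 else 0

-- ===== PORT A =====
-- inner 'for value in pixel' loop, state = (tuple built so far, currentIndex);
-- math.floor(value / 2) = PySem.Int.floordiv value 2 exactly on |value| ≤ 2^31 (Dom).
def encRowA (msg : List Char) : List Int → Nat → (List Int × Nat)
  | [], i => ([], i)
  | v :: vs, i =>
    if i < msg.length then
      let w := PySem.Int.floordiv v 2 * 2 + pyInt2 (msg.getD i '0')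
      let r := encRowA msg vs (i + 1)
      (w :: r.1, r.2)
    else
      let r := encRowA msg vs i
      (v :: r.1, r.2)

-- outer 'for pixel in pixels' loop
def goA (msg : List Char) : List (List Int) → Nat → List (List Int)
  | [], _ => []
  | p :: ps, i =>
    let r := encRowA msg p i
    r.1 :: goA msg ps r.2

def encodeMessageInPixels (pixels : List (List Int)) (binaryMessage : String) : List (List Int) :=
  goA binaryMessage.toList pixels 0

-- ===== PORT B =====
-- the regroup loop: for each pixel slice the next len(pixel) entries out of res
def regroupB (res : List Int) : List (List Int) → Int → List (List Int)
  | [], _ => []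
  | p :: ps, off =>
    PySem.List.slice res (some off) (some (off + (p.length : Int))) :: regroupB res ps (off + (p.length : Int))

def encodeMessageInPixels_alt (pixels : List (List Int)) (binaryMessage : String) : List (List Int) :=
  let flat := pixels.flatMap id
  let n : Int := min (binaryMessage.toList.length : Int) (flat.length : Int)
  let res := (PySem.List.enumerate flat).map (fun jv =>
    if jv.1 < n then PySem.Int.floordiv jv.2 2 * 2 + pyInt2 (binaryMessage.toList.getD jv.1.toNat '0')
    else jv.2)
  regroupB res pixels 0

-- ===== PRECONDITION & SPEC =====
-- Pre_ excludes exactly the inputs where Python A raises ValueError: a character other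
-- than '0'/'1' among the consumed message prefix (the first min(len(msg), #values) chars).
def Pre_encodeMessageInPixels (pixels : List (List Int)) (binaryMessage : String) : Prop :=
  (binaryMessage.toList.take ((pixels.map List.length).sum)).all (fun c => c == '0' || c == '1') = true
instance (pixels : List (List Int)) (binaryMessage : String) : Decidable (Pre_encodeMessageInPixels pixels binaryMessage) := by unfold Pre_encodeMessageInPixels; infer_instance

def pvWitness_encodeMessageInPixels : List (List Int) × String := ([[10, 11], [12]], "101")

def Spec_encodeMessageInPixels (pixels : List (List Int)) (binaryMessage : String) (out : List (List Int)) : Prop := out = encodeMessageInPixels_alt pixels binaryMessage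
instance (pixels : List (List Int)) (binaryMessage : String) (out : List (List Int)) : Decidable (Spec_encodeMessageInPixels pixels binaryMessage out) := by unfold Spec_encodeMessageInPixels; infer_instance

-- ===== CLAIM (what is proved, stated in full; the proofs are below) =====
def Claim_equal_encodeMessageInPixels : Prop := ∀ (pixels : List (List Int)) (binaryMessage : String), Dom_encodeMessageInPixels pixels binaryMessage → Pre_encodeMessageInPixels pixels binaryMessage → Spec_encodeMessageInPixels pixels binaryMessage (encodeMessageInPixels pixels binaryMessage)

-- ===== LEMMAS AND PROOFS =====

-- common specification: value at global flat position j
def gSpec (msg : List Char) (j : Nat) (v : Int) : Int :=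
  if j < msg.length then PySem.Int.floordiv v 2 * 2 + pyInt2 (msg.getD j '0') else v

def goS (msg : List Char) : List (List Int) → Nat → List (List Int)
  | [], _ => []
  | p :: ps, off => p.mapIdx (fun k v => gSpec msg (off + k) v) :: goS msg ps (off + p.length)

theorem gSpec_ge (msg : List Char) (j : Nat) (v : Int) (h : msg.length ≤ j) :
    gSpec msg j v = v := by
  simp [gSpec]; omega

theorem mapIdx_gSpec_ge (msg : List Char) (l : List Int) (off : Nat) (h : msg.length ≤ off) :
    l.mapIdx (fun k v => gSpec msg (off + k) v) = l := by
  apply List.ext_getElem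
  · simp
  · intro i h1 h2
    simp only [List.getElem_mapIdx]
    exact gSpec_ge msg (off + i) l[i] (by omega)

theorem encRowA_eq (msg : List Char) (p : List Int) : ∀ off : Nat,
    encRowA msg p (min off msg.length)
      = (p.mapIdx (fun k v => gSpec msg (off + k) v), min (off + p.length) msg.length) := by
  induction p with
  | nil => intro off; simp [encRowA]
  | cons v vs ih =>
    intro off
    by_cases h : off < msg.length
    · have hmin : min off msg.length = off := by omega
      have ih1 := ih (off + 1)
      rw [show min (off + 1) msg.length = off + 1 by omega] at ih1
      simp only [encRowA, hmin, if_pos h, ih1]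
      rw [Prod.mk.injEq]
      refine ⟨?_, by simp; omega⟩
      rw [List.mapIdx_cons]
      congr 1
      · simp [gSpec, h]
      · have hf : (fun (i : ℕ) (w : ℤ) => gSpec msg (off + (i + 1)) w)
            = (fun (i : ℕ) (w : ℤ) => gSpec msg (off + 1 + i) w) := by
          funext i w; congr 1; omega
        rw [hf]
    · have hmin : min off msg.length = msg.length := by omega
      have ihL := ih off
      rw [hmin] at ihL
      simp only [encRowA, hmin, if_neg (by omega : ¬ msg.length < msg.length), ihL]
      rw [Prod.mk.injEq]
      refine ⟨?_, by simp; omega⟩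
      rw [mapIdx_gSpec_ge msg vs off (by omega), List.mapIdx_cons,
        gSpec_ge msg (off + 0) v (by omega)]
      congr 1
      have hf : (fun (i : ℕ) (w : ℤ) => gSpec msg (off + (i + 1)) w)
          = (fun (i : ℕ) (w : ℤ) => gSpec msg (off + 1 + i) w) := by
        funext i w; congr 1; omega
      rw [hf, mapIdx_gSpec_ge msg vs (off + 1) (by omega)]

theorem goA_eq (msg : List Char) (ps : List (List Int)) : ∀ off : Nat,
    goA msg ps (min off msg.length) = goS msg ps off := by
  induction ps with
  | nil => intro off; simp [goA, goS]
  | cons p ps ih =>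
    intro off
    simp only [goA, goS, encRowA_eq msg p off]
    rw [show min (off + p.length) msg.length = min (off + p.length) msg.length from rfl]
    exact congrArg _ (ih (off + p.length))

theorem res_eq (msg : List Char) (flat : List Int) :
    (PySem.List.enumerate flat).map (fun jv =>
        if jv.1 < min (msg.length : Int) (flat.length : Int) then
          PySem.Int.floordiv jv.2 2 * 2 + pyInt2 (msg.getD jv.1.toNat '0')
        else jv.2)
      = flat.mapIdx (fun k v => gSpec msg k v) := by
  apply List.ext_getElem
  · simp [PySem.List.length_enumerate]
  · intro i h1 h2
    simp only [List.getElem_map, PySem.List.getElem_enumerate, List.getElem_mapIdx, gSpec]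
    rw [List.length_map, PySem.List.length_enumerate] at h1
    by_cases hL : i < msg.length
    · rw [if_pos (by omega), if_pos hL]
      simp
    · rw [if_neg (by omega), if_neg hL]

theorem regroupB_eq (msg : List Char) (ps : List (List Int)) : ∀ front : List Int,
    regroupB ((front ++ ps.flatMap id).mapIdx (fun k v => gSpec msg k v)) ps (front.length : Int)
      = goS msg ps front.length := by
  induction ps with
  | nil => intro front; simp [regroupB, goS]
  | cons p ps ih =>
    intro front
    simp only [regroupB, goS, List.flatMap_cons, id]
    congr 1
    · -- the sliced chunk is exactly this pixel's mapIdx image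
      rw [PySem.List.slice_natCast_add, List.mapIdx_append,
        List.drop_left' (by simp : (front.mapIdx (fun k v => gSpec msg k v)).length = front.length),
        List.mapIdx_append,
        List.take_left' (by simp : (p.mapIdx (fun i v => gSpec msg (i + front.length) v)).length = p.length)]
      apply List.ext_getElem
      · simp
      · intro i h1 h2
        simp only [List.getElem_mapIdx]
        congr 1
        omega
    · -- recurse with front extended by this pixel
      have h1 : (front.length : Int) + (p.length : Int) = ((front ++ p).length : Int) := by
        simp
      have h2 : front ++ (p ++ ps.flatMap id) = (front ++ p) ++ ps.flatMap id := by
        simp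
      rw [h1, h2, ih (front ++ p)]
      have h3 : (front ++ p).length = front.length + p.length := by simp
      rw [h3]

theorem encodeMessageInPixels_spec : Claim_equal_encodeMessageInPixels := by
  intro pixels binaryMessage _ _
  unfold Spec_encodeMessageInPixels
  show encodeMessageInPixels pixels binaryMessage = encodeMessageInPixels_alt pixels binaryMessage
  simp only [encodeMessageInPixels, encodeMessageInPixels_alt]
  rw [res_eq binaryMessage.toList (pixels.flatMap id)]
  have hA : goA binaryMessage.toList pixels 0 = goS binaryMessage.toList pixels 0 := by
    have := goA_eq binaryMessage.toList pixels 0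
    rwa [Nat.min_comm, Nat.min_zero] at this
  have hB := regroupB_eq binaryMessage.toList pixels []
  simp only [List.nil_append, List.length_nil, Nat.cast_zero] at hB
  rw [hA, hB]
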